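-- pv_equiv track=rewrite | github.com/Masthanaiah-C/practice | c2.py | sequenc
-- ===== SOURCE A (Python) =====
-- def sequenc(org,chg,res):
--     j=0
--
--     for i in range(len(org)-1):
--         if (org[i]==chg[i]):
--             continue
--         else:
--             j=i+1
--             while(j<len(org)):
--                 if(org[i]==chg[j]):
--                     for k in range(i,j):
--                         res.append((k,k+1))
--                     if(j>1):
--                         for k in range(j-1,i,-1):
--                             res.append((k,k-1))
--                     k=list(chg)
--                     m=k[j]
--                     k[j]=k[i]
--                     k[i]=m
--                     chg="".join(k)
--                     return sequenc(org,chg,res)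
--                 else:
--                     j+=1
--     return res
-- ===== SOURCE B (Python) =====
-- def sequenc(org, chg, res):
--     n = len(org)
--     c = list(chg)
--     for i in range(n - 1):
--         if org[i] == c[i]:
--             continue
--         sub = c[i + 1:n]
--         if org[i] in sub:
--             j = i + 1 + sub.index(org[i])
--             for k in range(i, j):
--                 res.append((k, k + 1))
--             if j > 1:
--                 for k in range(j - 1, i, -1):
--                     res.append((k, k - 1))
--             c[i], c[j] = c[j], c[i]
--     return res
-- ===== Notes on version B (the rewrite author's own statement) =====
-- stated objective: faster
-- what changed: A fixes one mismatch per pass and restarts the whole scan from index 0 via tail recursion; B makes a single left-to-right pass, fixing each mismatch in place and never rescanning the settled prefix (valid because a swap only permutes the suffix, so earlier positions stay matched or stay partnerless).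
-- outside the precondition, e.g. on sequenc('ab', 'a', []): A returns [], B returns []
import Mathlib
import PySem

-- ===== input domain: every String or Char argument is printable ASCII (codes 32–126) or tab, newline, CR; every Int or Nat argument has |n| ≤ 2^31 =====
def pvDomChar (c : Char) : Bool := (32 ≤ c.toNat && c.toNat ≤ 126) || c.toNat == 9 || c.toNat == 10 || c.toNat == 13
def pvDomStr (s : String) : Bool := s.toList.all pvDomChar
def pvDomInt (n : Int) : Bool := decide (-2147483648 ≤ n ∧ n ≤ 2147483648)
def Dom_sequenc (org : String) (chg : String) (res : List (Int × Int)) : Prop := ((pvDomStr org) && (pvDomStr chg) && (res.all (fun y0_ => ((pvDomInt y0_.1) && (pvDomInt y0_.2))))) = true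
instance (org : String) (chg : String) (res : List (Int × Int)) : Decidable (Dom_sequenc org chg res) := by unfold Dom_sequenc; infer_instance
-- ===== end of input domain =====

-- B replaces A's tail-recursive restart-from-0 scan by a single left-to-right pass (alternative
-- decomposition; no restarts).  Both Pythons mutate `res` in place by the same appends; the
-- equivalence proved here is about the returned list (which is that mutated `res`).

-- ===== PORT A =====
-- the swap cascade recorded in res: `for k in range(i,j): append (k,k+1)` then
-- `if j>1: for k in range(j-1,i,-1): append (k,k-1)` (shared verbatim by both Pythons)
def pvCascade (i j : Nat) : List (Int × Int) :=
  (PySem.List.pyRange (i : Nat) (j : Nat) 1).map (fun k => (k, k + 1)) ++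
    (if 1 < j then (PySem.List.pyRange ((j : Nat) - 1) (i : Nat) (-1)).map (fun k => (k, k - 1)) else [])

-- A's while loop `j=i+1; while j<len(org): if org[i]==chg[j]: … ; else j+=1`
def pvFindJ (org c : List Char) (i j : Nat) : Option Nat :=
  if h : j < org.length then
    if org.getD i ' ' = c.getD j ' ' then some j else pvFindJ org c i (j + 1)
  else none
termination_by org.length - j
decreasing_by omega

-- A's `k=list(chg); m=k[j]; k[j]=k[i]; k[i]=m; chg="".join(k)`
def pvSwapA (c : List Char) (i j : Nat) : List Char :=
  (c.set j (c.getD i ' ')).set i (c.getD j ' ')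

-- A's `for i in range(len(org)-1)` with the recursive restart `return sequenc(org,chg,res)`;
-- `fuel` bounds the number of restarts (the proof shows len(org) restarts always suffice on Pre_)
def pvLoopA (org : List Char) (fuel : Nat) (c : List Char) (res : List (Int × Int)) (i : Nat) :
    List (Int × Int) :=
  if hi : i < org.length - 1 then
    if org.getD i ' ' = c.getD i ' ' then pvLoopA org fuel c res (i + 1)
    else
      match pvFindJ org c i (i + 1) with
      | some j =>
          match fuel with
          | 0 => res ++ pvCascade i j
          | fuel' + 1 => pvLoopA org fuel' (pvSwapA c i j) (res ++ pvCascade i j) 0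
      | none => pvLoopA org fuel c res (i + 1)
  else res
termination_by (fuel, org.length - i)
decreasing_by
  · right; omega
  · left; omega
  · right; omega

def sequenc (org : String) (chg : String) (res : List (Int × Int)) : List (Int × Int) :=
  pvLoopA org.toList org.toList.length chg.toList res 0

-- ===== PORT B =====
-- B's tuple swap `c[i], c[j] = c[j], c[i]`
def pvSwapB (c : List Char) (i j : Nat) : List Char :=
  (c.set i (c.getD j ' ')).set j (c.getD i ' ')

-- B's single `for i in range(n-1)` pass; `gas` is the number of remaining iterations (n-1-i).
-- `if org[i] in sub: j = i+1+sub.index(org[i])` is ported as one match on PySem.List.index?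
-- (membership holds iff index? returns some).
def pvLoopB (org : List Char) : Nat → List Char → List (Int × Int) → Nat → List (Int × Int)
  | 0, _, res, _ => res
  | gas + 1, c, res, i =>
    if org.getD i ' ' = c.getD i ' ' then pvLoopB org gas c res (i + 1)
    else
      match PySem.List.index?
          (PySem.List.slice c (some ((i + 1 : Nat) : Int)) (some ((org.length : Nat) : Int)))
          (org.getD i ' ') with
      | some k =>
          pvLoopB org gas (pvSwapB c i (i + 1 + k)) (res ++ pvCascade i (i + 1 + k)) (i + 1)
      | none => pvLoopB org gas c res (i + 1)

def sequenc_alt (org : String) (chg : String) (res : List (Int × Int)) : List (Int × Int) :=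
  pvLoopB org.toList (org.toList.length - 1) chg.toList res 0

-- ===== PRECONDITION & SPEC =====
-- Pre_ excludes inputs with len(chg) < len(org): there A (and B) indexes chg past its end and
-- raises IndexError on almost all of them; on the few where every compared position happens to
-- match, A returns res unchanged before reaching the bad index (cited in claim.json) — Pre_ is
-- slightly narrower than the raising set, as that set is not closed-form.
def Pre_sequenc (org : String) (chg : String) (res : List (Int × Int)) : Prop :=
  org.toList.length ≤ chg.toList.length
instance (org : String) (chg : String) (res : List (Int × Int)) :
    Decidable (Pre_sequenc org chg res) := by unfold Pre_sequenc; infer_instance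

def pvWitness_sequenc : String × String × (List (Int × Int)) := ("ba", "ab", [])

def Spec_sequenc (org : String) (chg : String) (res : List (Int × Int)) (out : List (Int × Int)) : Prop := out = sequenc_alt org chg res
instance (org : String) (chg : String) (res : List (Int × Int)) (out : List (Int × Int)) : Decidable (Spec_sequenc org chg res out) := by unfold Spec_sequenc; infer_instance

-- ===== CLAIM (what is proved, stated in full; the proofs are below) =====
def Claim_equal_sequenc : Prop := ∀ (org : String) (chg : String) (res : List (Int × Int)), Dom_sequenc org chg res → Pre_sequenc org chg res → Spec_sequenc org chg res (sequenc org chg res)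

-- ===== LEMMAS AND PROOFS =====

-- the invariant A's restart re-establishes: every position before i already matches, or its
-- character never occurs to its right in org's range (so A's rescan of the prefix is a no-op)
def pvInv (org c : List Char) (i : Nat) : Prop :=
  ∀ p, p < i →
    org.getD p ' ' = c.getD p ' ' ∨
      ∀ q, p < q → q < org.length → org.getD p ' ' ≠ c.getD q ' '

theorem pvGetD_set (c : List Char) (i p : Nat) (v : Char) (hi : i < c.length) :
    (c.set i v).getD p ' ' = if p = i then v else c.getD p ' ' := by
  simp only [List.getD_eq_getElem?_getD, List.getElem?_set]
  by_cases h : p = i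
  · subst h; simp [hi]
  · simp [Ne.symm h, h]

theorem pvFindJ_eq_none_iff (org c : List Char) (i : Nat) : ∀ (j0 : Nat),
    (pvFindJ org c i j0 = none ↔
      ∀ q, j0 ≤ q → q < org.length → org.getD i ' ' ≠ c.getD q ' ') := by
  suffices H : ∀ n j0, org.length - j0 ≤ n → (pvFindJ org c i j0 = none ↔
      ∀ q, j0 ≤ q → q < org.length → org.getD i ' ' ≠ c.getD q ' ') from
    fun j0 => H (org.length - j0) j0 le_rfl
  intro n
  induction n with
  | zero =>
    intro j0 h0
    rw [pvFindJ, dif_neg (by omega)]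
    simp only [true_iff]
    intro q hq hq'; omega
  | succ n ih =>
    intro j0 h0
    rw [pvFindJ]
    by_cases hj : j0 < org.length
    · rw [dif_pos hj]
      by_cases he : org.getD i ' ' = c.getD j0 ' '
      · rw [if_pos he]
        simp only [reduceCtorEq, false_iff, not_forall]
        exact ⟨j0, le_rfl, hj, fun hne => hne he⟩
      · rw [if_neg he, ih (j0 + 1) (by omega)]
        constructor
        · intro H q hq hq'
          rcases Nat.eq_or_lt_of_le hq with rfl | hlt
          · exact he
          · exact H q hlt hq'
        · intro H q hq hq'; exact H q (by omega) hq'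
    · rw [dif_neg hj]
      simp only [true_iff]
      intro q hq hq'; omega

theorem pvFindJ_eq_some (org c : List Char) (i : Nat) : ∀ (j0 j : Nat),
    pvFindJ org c i j0 = some j →
    j0 ≤ j ∧ j < org.length ∧ org.getD i ' ' = c.getD j ' ' := by
  suffices H : ∀ n j0 j, org.length - j0 ≤ n → pvFindJ org c i j0 = some j →
      j0 ≤ j ∧ j < org.length ∧ org.getD i ' ' = c.getD j ' ' from
    fun j0 j => H (org.length - j0) j0 j le_rfl
  intro n
  induction n with
  | zero =>
    intro j0 j h0 h
    rw [pvFindJ, dif_neg (by omega)] at h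
    exact absurd h (by simp)
  | succ n ih =>
    intro j0 j h0 h
    rw [pvFindJ] at h
    by_cases hj : j0 < org.length
    · rw [dif_pos hj] at h
      by_cases he : org.getD i ' ' = c.getD j0 ' '
      · rw [if_pos he] at h
        obtain rfl : j0 = j := by simpa using h
        exact ⟨le_rfl, hj, he⟩
      · rw [if_neg he] at h
        obtain ⟨h1, h2, h3⟩ := ih (j0 + 1) j (by omega) h
        exact ⟨by omega, h2, h3⟩
    · rw [dif_neg hj] at h
      exact absurd h (by simp)

-- A's while-search from i+1 computes exactly B's index? over the slice c[i+1:len(org)]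
theorem pvFindJ_eq_index? (org c : List Char) (i : Nat) (hlen : org.length ≤ c.length) :
    ∀ j0, pvFindJ org c i j0 =
      (PySem.List.index? (PySem.List.slice c (some ((j0 : Nat) : Int)) (some ((org.length : Nat) : Int)))
        (org.getD i ' ')).map (fun k => j0 + k) := by
  suffices H : ∀ n j0, org.length - j0 ≤ n → pvFindJ org c i j0 =
      (PySem.List.index? (PySem.List.slice c (some ((j0 : Nat) : Int)) (some ((org.length : Nat) : Int)))
        (org.getD i ' ')).map (fun k => j0 + k) from fun j0 => H (org.length - j0) j0 le_rfl
  intro n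
  induction n with
  | zero =>
    intro j0 h0
    have hge : ¬ j0 < org.length := by omega
    rw [pvFindJ, dif_neg hge, PySem.List.slice_natCast]
    have : org.length - j0 = 0 := by omega
    rw [this]
    simp
  | succ n ih =>
    intro j0 h0
    rw [pvFindJ]
    by_cases hj : j0 < org.length
    · have hjc : j0 < c.length := by omega
      have hgd0 : c.getD j0 ' ' = c.get ⟨j0, hjc⟩ := by
        simp [List.getD_eq_getElem?_getD, List.getElem?_eq_getElem hjc]
      have hdrop : c.drop j0 = c.getD j0 ' ' :: c.drop (j0 + 1) := by
        rw [hgd0]; exact List.drop_eq_getElem_cons hjc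
      have hslice : PySem.List.slice c (some ((j0 : Nat) : Int)) (some ((org.length : Nat) : Int)) =
          c.getD j0 ' ' :: PySem.List.slice c (some ((j0 + 1 : Nat) : Int)) (some ((org.length : Nat) : Int)) := by
        rw [PySem.List.slice_natCast, PySem.List.slice_natCast, hdrop]
        have : org.length - j0 = (org.length - (j0 + 1)) + 1 := by omega
        rw [this, List.take_succ_cons]
      rw [dif_pos hj, hslice]
      by_cases he : org.getD i ' ' = c.getD j0 ' '
      · rw [if_pos he]
        rw [← he, PySem.List.index?_cons_self]
        simp
      · rw [if_neg he, ih (j0 + 1) (by omega)]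
        rw [PySem.List.index?_cons_of_ne _ (fun hx => he hx.symm)]
        cases PySem.List.index? (PySem.List.slice c (some ((j0 + 1 : Nat) : Int))
            (some ((org.length : Nat) : Int))) (org.getD i ' ') with
        | none => simp
        | some k => simp only [Option.map_some]; congr 1; omega
    · rw [dif_neg hj, PySem.List.slice_natCast]
      have : org.length - j0 = 0 := by omega
      rw [this]
      simp

theorem pvInv_step (org c : List Char) (i j : Nat) (hlen : org.length ≤ c.length)
    (hi : i < org.length - 1) (hinv : pvInv org c i)
    (hj : pvFindJ org c i (i + 1) = some j) :
    pvInv org (pvSwapA c i j) (i + 1) := by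
  obtain ⟨hij, hjn, hmatch⟩ := pvFindJ_eq_some org c i (i + 1) j hj
  have hic : i < c.length := by omega
  have hjc : j < c.length := by omega
  have hswap : ∀ p, (pvSwapA c i j).getD p ' ' =
      if p = i then c.getD j ' ' else if p = j then c.getD i ' ' else c.getD p ' ' := by
    intro p
    unfold pvSwapA
    rw [pvGetD_set _ i p _ (by simpa using hic)]
    by_cases hpi : p = i
    · simp [hpi]
    · rw [if_neg hpi, if_neg hpi, pvGetD_set _ j p _ hjc]
  intro p hp
  rcases Nat.lt_succ_iff_lt_or_eq.mp hp with hpi | rfl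
  · rcases hinv p hpi with hm | hnm
    · left
      rw [hswap p, if_neg (by omega), if_neg (by omega)]
      exact hm
    · right
      intro q hq hq'
      rw [hswap q]
      by_cases hqi : q = i
      · rw [if_pos hqi]; exact hnm j (by omega) hjn
      · rw [if_neg hqi]
        by_cases hqj : q = j
        · rw [if_pos hqj]; exact hnm i (by omega) (by omega)
        · rw [if_neg hqj]; exact hnm q hq hq'
  · left
    rw [hswap p, if_pos rfl]
    exact hmatch

theorem pvInv_matched (org c : List Char) (i : Nat) (hinv : pvInv org c i)
    (h : org.getD i ' ' = c.getD i ' ') : pvInv org c (i + 1) := by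
  intro p hp
  rcases Nat.lt_succ_iff_lt_or_eq.mp hp with h' | h'
  · exact hinv p h'
  · exact h' ▸ Or.inl h

theorem pvInv_nomatch (org c : List Char) (i : Nat) (hinv : pvInv org c i)
    (h : pvFindJ org c i (i + 1) = none) : pvInv org c (i + 1) := by
  intro p hp
  rcases Nat.lt_succ_iff_lt_or_eq.mp hp with h' | h'
  · exact hinv p h'
  · subst h'
    exact Or.inr fun q hq hq' => (pvFindJ_eq_none_iff org c p (p + 1)).mp h q hq hq'

-- rescanning the already-settled prefix appends nothing and just walks i forward
theorem pvSkip (org : List Char) (fuel : Nat) :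
    ∀ d a c res, pvInv org c (a + d) → a + d ≤ org.length - 1 →
      pvLoopA org fuel c res a = pvLoopA org fuel c res (a + d) := by
  intro d
  induction d with
  | zero => intro a c res _ _; rfl
  | succ d ih =>
    intro a c res hinv hle
    have ha : a < org.length - 1 := by omega
    have step : pvLoopA org fuel c res a = pvLoopA org fuel c res (a + 1) := by
      rw [pvLoopA, dif_pos ha]
      by_cases he : org.getD a ' ' = c.getD a ' '
      · rw [if_pos he]
      · rw [if_neg he]
        rcases hinv a (by omega) with hm | hnm
        · exact absurd hm he
        · rw [(pvFindJ_eq_none_iff org c a (a + 1)).mpr (fun q hq hq' => hnm q (by omega) hq')]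
    rw [step]
    have : a + 1 + d = a + (d + 1) := by omega
    rw [← this]
    exact ih (a + 1) c res (by rw [this]; exact hinv) (by omega)

theorem pvSwapB_eq_pvSwapA (c : List Char) (i j : Nat) (h : i ≠ j) :
    pvSwapB c i j = pvSwapA c i j := by
  unfold pvSwapA pvSwapB
  exact List.set_comm _ _ h

theorem pvMain (org : List Char) :
    ∀ fuel m c res i, org.length ≤ c.length → pvInv org c i →
      m = org.length - 1 - i → m ≤ fuel →
      pvLoopA org fuel c res i = pvLoopB org m c res i := by
  intro fuel
  induction fuel with
  | zero =>
    intro m c res i hlen hinv hm hfuel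
    obtain rfl : m = 0 := by omega
    rw [pvLoopA, dif_neg (by omega)]
    rfl
  | succ fuel ihf =>
    intro m
    induction m with
    | zero =>
      intro c res i hlen hinv hm hfuel
      rw [pvLoopA, dif_neg (by omega)]
      rfl
    | succ m ihm =>
      intro c res i hlen hinv hm hfuel
      have hi : i < org.length - 1 := by omega
      rw [pvLoopA, dif_pos hi]
      show _ = pvLoopB org (m + 1) c res i
      rw [pvLoopB]
      by_cases he : org.getD i ' ' = c.getD i ' '
      · rw [if_pos he, if_pos he]
        exact ihm c res (i + 1) hlen (pvInv_matched org c i hinv he) (by omega) (by omega)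
      · rw [if_neg he, if_neg he]
        cases hfj : pvFindJ org c i (i + 1) with
        | none =>
          have hidx : PySem.List.index? (PySem.List.slice c (some ((i + 1 : Nat) : Int))
              (some ((org.length : Nat) : Int))) (org.getD i ' ') = none := by
            have := (pvFindJ_eq_index? org c i hlen (i + 1)).symm.trans hfj
            cases hx : PySem.List.index? (PySem.List.slice c (some ((i + 1 : Nat) : Int))
                (some ((org.length : Nat) : Int))) (org.getD i ' ') with
            | none => rfl
            | some k => rw [hx] at this; simp at this
          rw [hidx]
          show pvLoopA org (fuel + 1) c res (i + 1) = pvLoopB org m c res (i + 1)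
          exact ihm c res (i + 1) hlen (pvInv_nomatch org c i hinv hfj) (by omega) (by omega)
        | some j =>
          obtain ⟨hij, hjn, _⟩ := pvFindJ_eq_some org c i (i + 1) j hfj
          have hcorr := (pvFindJ_eq_index? org c i hlen (i + 1)).symm.trans hfj
          cases hx : PySem.List.index? (PySem.List.slice c (some ((i + 1 : Nat) : Int))
              (some ((org.length : Nat) : Int))) (org.getD i ' ') with
          | none => rw [hx] at hcorr; simp at hcorr
          | some k =>
            rw [hx] at hcorr
            simp only [Option.map_some, Option.some.injEq] at hcorr
            obtain rfl : j = i + 1 + k := hcorr.symm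
            show pvLoopA org fuel (pvSwapA c i (i + 1 + k)) (res ++ pvCascade i (i + 1 + k)) 0 =
              pvLoopB org m (pvSwapB c i (i + 1 + k)) (res ++ pvCascade i (i + 1 + k)) (i + 1)
            have hinv' : pvInv org (pvSwapA c i (i + 1 + k)) (i + 1) :=
              pvInv_step org c i (i + 1 + k) hlen hi hinv hfj
            have hlen' : org.length ≤ (pvSwapA c i (i + 1 + k)).length := by
              unfold pvSwapA; simpa using hlen
            have hskip := pvSkip org fuel (i + 1) 0 (pvSwapA c i (i + 1 + k))
              (res ++ pvCascade i (i + 1 + k)) (by simpa using hinv') (by omega)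
            simp only [Nat.zero_add] at hskip
            rw [hskip, pvSwapB_eq_pvSwapA c i (i + 1 + k) (by omega)]
            exact ihf m (pvSwapA c i (i + 1 + k)) (res ++ pvCascade i (i + 1 + k)) (i + 1)
              hlen' hinv' (by omega) (by omega)

-- ===== VERDICT (by name: the statement is the Claim_ definition above) =====
theorem sequenc_spec : Claim_equal_sequenc := by
  intro org chg res _ hpre
  unfold Spec_sequenc sequenc sequenc_alt
  exact pvMain org.toList org.toList.length (org.toList.length - 1) chg.toList res 0 hpre
    (fun p hp => absurd hp (Nat.not_lt_zero p)) (by omega) (by omega)
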